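-- pv_equiv track=rewrite | github.com/AzeezFolorunsho/WordGame | wordle_plus_game/src/components/graph.py | _organize_data_by_difficulty
-- ===== SOURCE A (Python) =====
-- def _organize_data_by_difficulty(data):
--     """
--     Organizes data into a dictionary grouped by difficulty level.
--
--     Args:
--         data (list of dicts): The data to be organized.
--
--     Returns:
--         dict: A dictionary with difficulty levels as keys and corresponding scores and times as values.
--     """
--     difficulty_levels = {}
--     for entry in data:
--         difficulty = entry['Difficulty']
--         if difficulty not in difficulty_levels:
--             difficulty_levels[difficulty] = {'Score': [], 'Time': []}
--         difficulty_levels[difficulty]['Score'].append(entry['Score'])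
--         difficulty_levels[difficulty]['Time'].append(entry['Time'])
--     return difficulty_levels
-- ===== SOURCE B (Python) =====
-- def _organize_data_by_difficulty(data):
--     keys = dict.fromkeys(entry['Difficulty'] for entry in data)
--     return {
--         d: {'Score': [e['Score'] for e in data if e['Difficulty'] == d],
--             'Time': [e['Time'] for e in data if e['Difficulty'] == d]}
--         for d in keys
--     }
-- ===== Notes on version B (the rewrite author's own statement) =====
-- stated objective: alternative
-- what changed: Replaces A's single mutating-accumulator pass (create-then-append into a nested dict) with collect distinct difficulties first, then build each group's Score/Time lists by per-key comprehensions over the data.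
import Mathlib
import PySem

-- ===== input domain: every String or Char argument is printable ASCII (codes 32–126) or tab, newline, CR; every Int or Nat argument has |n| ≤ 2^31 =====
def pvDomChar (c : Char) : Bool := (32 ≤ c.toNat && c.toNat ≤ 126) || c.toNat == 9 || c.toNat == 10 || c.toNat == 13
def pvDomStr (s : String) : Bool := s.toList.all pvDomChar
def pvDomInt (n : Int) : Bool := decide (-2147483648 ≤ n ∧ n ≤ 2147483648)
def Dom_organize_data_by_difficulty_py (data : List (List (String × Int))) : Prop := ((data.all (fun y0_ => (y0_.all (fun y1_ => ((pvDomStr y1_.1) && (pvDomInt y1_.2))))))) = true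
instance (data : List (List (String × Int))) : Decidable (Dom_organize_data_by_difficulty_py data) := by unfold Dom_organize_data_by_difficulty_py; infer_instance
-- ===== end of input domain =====

-- B changes the decomposition (collect distinct difficulties, then per-key rescans) — objective: alternative.

-- shared helper: entry[k] on a Python dict (first match); the default 0 is unreachable under
-- Pre_, which excludes exactly the entries on which Python raises KeyError
def pyGetItem (m : List (String × Int)) (k : String) : Int :=
  match m.find? (fun p => p.1 == k) with
  | some p => p.2
  | none => 0

-- ===== PORT A =====
def orgStep (acc : List (Int × List (String × List Int))) (entry : List (String × Int)) :
    List (Int × List (String × List Int)) :=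
  let d := pyGetItem entry "Difficulty"
  let acc1 := if acc.any (fun p => p.1 == d) then acc
              else acc ++ [(d, [("Score", ([] : List Int)), ("Time", ([] : List Int))])]
  let acc2 := acc1.map (fun p => if p.1 == d then
      (p.1, p.2.map (fun q => if q.1 == "Score" then (q.1, q.2 ++ [pyGetItem entry "Score"]) else q))
    else p)
  acc2.map (fun p => if p.1 == d then
      (p.1, p.2.map (fun q => if q.1 == "Time" then (q.1, q.2 ++ [pyGetItem entry "Time"]) else q))
    else p)

def organize_data_by_difficulty_py (data : List (List (String × Int))) :
    List (Int × List (String × List Int)) :=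
  data.foldl orgStep []

-- ===== PORT B =====
def organize_data_by_difficulty_py_alt (data : List (List (String × Int))) :
    List (Int × List (String × List Int)) :=
  let keys : PySem.Set Int := PySem.Set.ofList (data.map (fun e => pyGetItem e "Difficulty"))
  keys.map (fun d =>
    (d, [("Score", (data.filter (fun e => pyGetItem e "Difficulty" == d)).map (fun e => pyGetItem e "Score")),
         ("Time",  (data.filter (fun e => pyGetItem e "Difficulty" == d)).map (fun e => pyGetItem e "Time"))]))

-- ===== PRECONDITION & SPEC =====
-- Pre_ excludes exactly the inputs on which A raises KeyError: an entry missing one of the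
-- keys 'Difficulty', 'Score', 'Time' (B raises there too).
def Pre_organize_data_by_difficulty_py (data : List (List (String × Int))) : Prop :=
  (data.all (fun e => e.any (fun p => p.1 == "Difficulty") &&
                      e.any (fun p => p.1 == "Score") &&
                      e.any (fun p => p.1 == "Time"))) = true
instance (data : List (List (String × Int))) : Decidable (Pre_organize_data_by_difficulty_py data) := by
  unfold Pre_organize_data_by_difficulty_py; infer_instance

def pvWitness_organize_data_by_difficulty_py : (List (List (String × Int))) :=
  [[("Difficulty", 1), ("Score", 5), ("Time", 9)], [("Difficulty", 2), ("Score", 3), ("Time", 4)]]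

def Spec_organize_data_by_difficulty_py (data : List (List (String × Int))) (out : List (Int × List (String × List Int))) : Prop := out = organize_data_by_difficulty_py_alt data
instance (data : List (List (String × Int))) (out : List (Int × List (String × List Int))) : Decidable (Spec_organize_data_by_difficulty_py data out) := by unfold Spec_organize_data_by_difficulty_py; infer_instance

-- ===== CLAIM (what is proved, stated in full; the proofs are below) =====
def Claim_equal_organize_data_by_difficulty_py : Prop := ∀ (data : List (List (String × Int))), Dom_organize_data_by_difficulty_py data → Pre_organize_data_by_difficulty_py data → Spec_organize_data_by_difficulty_py data (organize_data_by_difficulty_py data)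

-- ===== LEMMAS AND PROOFS =====

def keyOf (e : List (String × Int)) : Int := pyGetItem e "Difficulty"

def rowOf (l : List (List (String × Int))) (d : Int) : Int × List (String × List Int) :=
  (d, [("Score", (l.filter (fun e => keyOf e == d)).map (fun e => pyGetItem e "Score")),
       ("Time",  (l.filter (fun e => keyOf e == d)).map (fun e => pyGetItem e "Time"))])

def orgF (l : List (List (String × Int))) : List (Int × List (String × List Int)) :=
  (PySem.Set.ofList (l.map keyOf)).map (rowOf l)

theorem alt_eq_F (data : List (List (String × Int))) :
    organize_data_by_difficulty_py_alt data = orgF data := rfl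

theorem row_update (l : List (List (String × Int))) (e : List (String × Int)) (d : Int) :
    (fun p : Int × List (String × List Int) => if p.1 == keyOf e then
        (p.1, p.2.map (fun q => if q.1 == "Time" then (q.1, q.2 ++ [pyGetItem e "Time"]) else q)) else p)
    ((fun p : Int × List (String × List Int) => if p.1 == keyOf e then
        (p.1, p.2.map (fun q => if q.1 == "Score" then (q.1, q.2 ++ [pyGetItem e "Score"]) else q)) else p)
      (rowOf l d)) = rowOf (l ++ [e]) d := by
  by_cases hd : d = keyOf e
  · simp [rowOf, hd, List.filter_append]
  · simp [rowOf, List.filter_append, hd, Ne.symm hd]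

theorem any_key (l : List (List (String × Int))) (d0 : Int) :
    (orgF l).any (fun p => p.1 == d0) = decide (d0 ∈ l.map keyOf) := by
  simp only [orgF, List.any_map]
  rcases Decidable.em (d0 ∈ l.map keyOf) with h | h
  · simp only [h, decide_true]
    exact List.any_eq_true.mpr ⟨d0, ((PySem.Set.mem_ofList _ _).mpr h), by simp [rowOf]⟩
  · simp only [h, decide_false]
    refine List.any_eq_false.mpr ?_
    intro d hd
    simp only [Function.comp, rowOf, beq_iff_eq]
    intro hcon
    exact h (hcon ▸ ((PySem.Set.mem_ofList _ _).mp hd))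

theorem step_F (l : List (List (String × Int))) (e : List (String × Int)) :
    orgStep (orgF l) e = orgF (l ++ [e]) := by
  have hacc1 : (if (orgF l).any (fun p => p.1 == keyOf e) then orgF l
      else orgF l ++ [(keyOf e, [("Score", ([] : List Int)), ("Time", ([] : List Int))])])
      = (PySem.Set.ofList ((l ++ [e]).map keyOf)).map (rowOf l) := by
    rw [any_key, List.map_append, List.map_singleton, PySem.Set.ofList_append_singleton]
    rcases Decidable.em (keyOf e ∈ l.map keyOf) with h | h
    · rw [PySem.Set.add_of_mem (((PySem.Set.mem_ofList _ _).mpr h))]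
      simp [h, orgF]
    · rw [PySem.Set.add_of_not_mem (fun hc => h (((PySem.Set.mem_ofList _ _).mp hc)))]
      have hrow : rowOf l (keyOf e) = (keyOf e, [("Score", ([] : List Int)), ("Time", ([] : List Int))]) := by
        have : l.filter (fun e' => keyOf e' == keyOf e) = [] := by
          refine List.filter_eq_nil_iff.mpr ?_
          intro a ha
          simp only [beq_iff_eq]
          exact fun hc => h (hc ▸ List.mem_map_of_mem ha)
        simp [rowOf, this]
      simp [h, orgF, hrow]
  show ((if (orgF l).any (fun p => p.1 == keyOf e) then orgF l
      else orgF l ++ [(keyOf e, [("Score", ([] : List Int)), ("Time", ([] : List Int))])]).map _).map _ = _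
  rw [hacc1, List.map_map, List.map_map, orgF]
  exact List.map_congr_left (fun d _ => row_update l e d)

theorem foldl_F (l : List (List (String × Int))) :
    l.foldl orgStep [] = orgF l := by
  induction l using List.reverseRecOn with
  | nil => rfl
  | append_singleton xs x ih => rw [List.foldl_append, List.foldl_cons, List.foldl_nil, ih, step_F]

-- ===== VERDICT (by name: the statement is the Claim_ definition above) =====
theorem organize_data_by_difficulty_py_spec : Claim_equal_organize_data_by_difficulty_py := by
  intro data _ _
  unfold Spec_organize_data_by_difficulty_py organize_data_by_difficulty_py
  rw [alt_eq_F, foldl_F]
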